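-- pv_equiv track=rewrite | github.com/bkelly1984/archiver | common.py | get_shortest_unique_string
-- ===== SOURCE A (Python) =====
-- def get_shortest_unique_string(include, exclude, min_str=None):
--     index = 0
--     while True:
--         index += 1
--
--         # If either string has no more letters, return the whole included string
--         if len(include) == index or len(exclude) == index:
--             return include
--
--         # If there is a minimum string we are not higher than, go again
--         if min_str is not None and include[0:index] < min_str:
--             continue
--
--         # If the strings are no longer the same at this length, return the result
--         if include[0:index] != exclude[0:index]:
--             return include[0:index]
-- ===== SOURCE B (Python) =====
-- def get_shortest_unique_string(include, exclude, min_str=None):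
--     """Shortest prefix of include (length >= 1) that is >= min_str and differs
--     from exclude's prefix of the same length; the whole string if either string
--     runs out of characters first."""
--     li, le = len(include), len(exclude)
--     # longest common prefix length of include and exclude
--     j = 0
--     while j < li and j < le and include[j] == exclude[j]:
--         j += 1
--     if j == li and j == le:
--         return include          # identical strings: no prefix ever differs
--     # smallest t with include[:t] >= min_str
--     if min_str is None:
--         t = 0
--     else:
--         lm = len(min_str)
--         p = 0
--         while p < li and p < lm and include[p] == min_str[p]:
--             p += 1
--         if p == lm:
--             t = p
--         elif p < li and include[p] > min_str[p]:
--             t = p + 1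
--         else:
--             return include      # every prefix of include is below min_str
--     idx = max(j + 1, t)
--     # the scan stops once either string is exhausted; an empty exclude never stops it
--     stop = min(li, le) if exclude else li
--     return include[:idx] if idx < stop else include
-- ===== Notes on version B (the rewrite author's own statement) =====
-- stated objective: faster
-- what changed: B replaces A's while-loop that re-slices and re-compares growing prefixes at every index by two single char-by-char scans (longest common prefix j of include vs exclude, least prefix length t of include that is >= min_str) and one closed-form answer max(j+1,t) capped at the exhaustion length; Pre_ excludes only include=exclude='' where A's while-True loop never returns.
-- outside the precondition, e.g. on get_shortest_unique_string('', '', None): A does not finish within the time limit, B returns ''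
import Mathlib
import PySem

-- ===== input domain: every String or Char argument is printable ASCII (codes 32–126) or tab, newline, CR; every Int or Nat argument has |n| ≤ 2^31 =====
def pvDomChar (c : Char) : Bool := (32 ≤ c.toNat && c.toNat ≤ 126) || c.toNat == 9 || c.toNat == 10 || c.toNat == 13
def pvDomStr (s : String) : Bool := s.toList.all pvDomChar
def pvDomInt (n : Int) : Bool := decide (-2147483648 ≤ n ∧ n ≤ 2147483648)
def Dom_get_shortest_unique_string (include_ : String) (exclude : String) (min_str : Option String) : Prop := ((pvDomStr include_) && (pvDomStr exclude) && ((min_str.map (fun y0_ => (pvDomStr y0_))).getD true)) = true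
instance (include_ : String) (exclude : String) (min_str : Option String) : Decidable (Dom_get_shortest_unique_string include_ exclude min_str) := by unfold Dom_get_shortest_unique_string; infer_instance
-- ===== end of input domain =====

-- B replaces A's quadratic loop of fresh prefix comparisons by two linear scans and a
-- closed-form answer; objective: faster.

-- ===== PORT A =====
-- the while-True loop of A; `fuel` only makes it total in Lean (under Pre_ it is never exhausted)
def pvALoop (inc exc : List Char) (ms? : Option (List Char)) : Nat → Nat → List Char
  | 0, _ => inc
  | fuel+1, index =>
    let index' := index + 1
    if inc.length = index' ∨ exc.length = index' then inc
    else if (match ms? with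
             | some ms => PySem.Chars.strLt (PySem.List.slice inc (some (0:Int)) (some ((index' : Nat) : Int))) ms
             | none => false) = true then pvALoop inc exc ms? fuel index'
    else if PySem.List.slice inc (some (0:Int)) (some ((index' : Nat) : Int)) ≠ PySem.List.slice exc (some (0:Int)) (some ((index' : Nat) : Int)) then
      PySem.List.slice inc (some (0:Int)) (some ((index' : Nat) : Int))
    else pvALoop inc exc ms? fuel index'

def get_shortest_unique_string (include_ : String) (exclude : String) (min_str : Option String) : String :=
  String.ofList (pvALoop include_.toList exclude.toList (min_str.map String.toList)
    (include_.toList.length + exclude.toList.length + 1) 0)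

-- ===== PORT B =====
-- Source B's first while loop: longest common prefix length of include and exclude
def pvBScan : List Char → List Char → Nat → Nat
  | a::as, b::bs, j => if a = b then pvBScan as bs (j+1) else j
  | _, _, j => j

-- Source B's second while loop plus its three-way branch: smallest t with include[:t] >= min_str
-- (none = the early `return include`: every prefix of include is below min_str)
def pvBT : List Char → List Char → Nat → Option Nat
  | _, [], p => some p
  | [], _::_, _ => none
  | a::as, b::bs, p => if a = b then pvBT as bs (p+1) else if b < a then some (p + 1) else none

def get_shortest_unique_string_alt (include_ : String) (exclude : String) (min_str : Option String) : String :=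
  let inc := include_.toList
  let exc := exclude.toList
  let li := inc.length
  let le := exc.length
  let j := pvBScan inc exc 0
  if j = li ∧ j = le then include_
  else
    match (match min_str with
           | none => some 0
           | some ms => pvBT inc ms.toList 0) with
    | none => include_
    | some t =>
      let idx := max (j + 1) t
      let stop := if exc ≠ [] then min li le else li
      if idx < stop then String.ofList (PySem.List.slice inc none (some ((idx : Nat) : Int))) else include_

-- ===== PRECONDITION & SPEC =====
-- Pre_ excludes only include_ = "" ∧ exclude = "", where A's while-True loop never returns (it diverges).
def Pre_get_shortest_unique_string (include_ : String) (exclude : String) (min_str : Option String) : Prop :=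
  ¬ (include_ = "" ∧ exclude = "")
instance (include_ : String) (exclude : String) (min_str : Option String) : Decidable (Pre_get_shortest_unique_string include_ exclude min_str) := by unfold Pre_get_shortest_unique_string; infer_instance

def pvWitness_get_shortest_unique_string : String × String × Option String := ("abc", "abd", some "ab")

def Spec_get_shortest_unique_string (include_ : String) (exclude : String) (min_str : Option String) (out : String) : Prop := out = get_shortest_unique_string_alt include_ exclude min_str
instance (include_ : String) (exclude : String) (min_str : Option String) (out : String) : Decidable (Spec_get_shortest_unique_string include_ exclude min_str out) := by unfold Spec_get_shortest_unique_string; infer_instance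

-- ===== CLAIM (what is proved, stated in full; the proofs are below) =====
def Claim_equal_get_shortest_unique_string : Prop := ∀ (include_ : String) (exclude : String) (min_str : Option String), Dom_get_shortest_unique_string include_ exclude min_str → Pre_get_shortest_unique_string include_ exclude min_str → Spec_get_shortest_unique_string include_ exclude min_str (get_shortest_unique_string include_ exclude min_str)

-- ===== LEMMAS AND PROOFS =====

-- proof-only helper: position of the first mismatch, as an option (none = identical lists)
def pvBMismatch : List Char → List Char → Nat → Option Nat
  | a::as, b::bs, j => if a = b then pvBMismatch as bs (j+1) else some j
  | [], [], _ => none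
  | [], _::_, j => some j
  | _::_, [], j => some j

lemma pvBMismatch_shift (as bs : List Char) (j : Nat) :
    pvBMismatch as bs j = (pvBMismatch as bs 0).map (· + j) := by
  induction as generalizing bs j with
  | nil => cases bs <;> simp [pvBMismatch]
  | cons a as ih =>
    cases bs with
    | nil => simp [pvBMismatch]
    | cons b bs =>
      by_cases h : a = b
      · simp only [pvBMismatch, if_pos h, ih bs (j+1), ih bs 1]
        cases pvBMismatch as bs 0 <;> simp <;> omega
      · simp [pvBMismatch, h]

lemma pvBScan_shift (as bs : List Char) (j : Nat) :
    pvBScan as bs j = pvBScan as bs 0 + j := by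
  induction as generalizing bs j with
  | nil => cases bs <;> simp [pvBScan]
  | cons a as ih =>
    cases bs with
    | nil => simp [pvBScan]
    | cons b bs =>
      by_cases h : a = b
      · simp only [pvBScan, if_pos h, ih bs (j+1), ih bs 1]; omega
      · simp [pvBScan, h]

lemma pvBScan_getD (as bs : List Char) :
    pvBScan as bs 0 = (pvBMismatch as bs 0).getD as.length := by
  induction as generalizing bs with
  | nil => cases bs <;> simp [pvBScan, pvBMismatch]
  | cons a as ih =>
    cases bs with
    | nil => simp [pvBScan, pvBMismatch]
    | cons b bs =>
      by_cases h : a = b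
      · rw [pvBScan, if_pos h, pvBScan_shift, pvBMismatch, if_pos h, pvBMismatch_shift, ih bs]
        cases pvBMismatch as bs 0 <;> simp
      · simp [pvBScan, pvBMismatch, h]

lemma pvBMismatch_self (as : List Char) : pvBMismatch as as 0 = none := by
  induction as with
  | nil => simp [pvBMismatch]
  | cons a as ih => rw [pvBMismatch, if_pos rfl, pvBMismatch_shift, ih]; simp

lemma pvBMismatch_none (inc exc : List Char) (h : pvBMismatch inc exc 0 = none) : inc = exc := by
  induction inc generalizing exc with
  | nil => cases exc with
    | nil => rfl
    | cons b bs => simp [pvBMismatch] at h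
  | cons a as ih =>
    cases exc with
    | nil => simp [pvBMismatch] at h
    | cons b bs =>
      by_cases hab : a = b
      · rw [pvBMismatch, if_pos hab, pvBMismatch_shift] at h
        cases hres : pvBMismatch as bs 0 with
        | none => rw [hab, ih bs hres]
        | some m => rw [hres] at h; simp at h
      · simp [pvBMismatch, hab] at h

lemma pvBMismatch_some (inc exc : List Char) (m : Nat) (h : pvBMismatch inc exc 0 = some m) :
    ∀ i, inc.take i = exc.take i ↔ i ≤ m := by
  induction inc generalizing exc m with
  | nil =>
    cases exc with
    | nil => simp [pvBMismatch] at h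
    | cons b bs =>
      simp [pvBMismatch] at h
      intro i
      subst h
      simp [List.take_eq_nil_iff, eq_comm (a := ([] : List Char)), Nat.le_zero]
  | cons a as ih =>
    cases exc with
    | nil =>
      simp [pvBMismatch] at h
      intro i
      subst h
      constructor
      · intro he
        rcases Nat.eq_zero_or_pos i with h0 | h0
        · omega
        · exfalso; cases i with
          | zero => omega
          | succ j => simp at he
      · intro hi; interval_cases i; simp
    | cons b bs =>
      by_cases hab : a = b
      · rw [pvBMismatch, if_pos hab, pvBMismatch_shift] at h
        cases hres : pvBMismatch as bs 0 with
        | none => rw [hres] at h; simp at h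
        | some m' =>
          rw [hres] at h; simp at h
          intro i
          cases i with
          | zero => simp
          | succ j =>
            simp only [List.take_succ_cons, List.cons.injEq]
            rw [ih bs m' hres j]
            constructor
            · rintro ⟨_, hj⟩; omega
            · intro hi; exact ⟨hab, by omega⟩
      · simp only [pvBMismatch, if_neg hab] at h
        simp at h
        intro i
        subst h
        cases i with
        | zero => simp
        | succ j => simp [hab]

lemma pvBMismatch_some_ne (inc exc : List Char) (m : Nat) (h : pvBMismatch inc exc 0 = some m) :
    ¬ (m = inc.length ∧ m = exc.length) := by
  rintro ⟨h1, h2⟩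
  have ht := (pvBMismatch_some inc exc m h m).2 le_rfl
  rw [show inc.take m = inc by rw [h1]; exact List.take_length,
      show exc.take m = exc by rw [h2]; exact List.take_length] at ht
  rw [ht, pvBMismatch_self] at h
  simp at h

lemma pvBT_shift (as bs : List Char) (p : Nat) :
    pvBT as bs p = (pvBT as bs 0).map (· + p) := by
  induction as generalizing bs p with
  | nil => cases bs <;> simp [pvBT]
  | cons a as ih =>
    cases bs with
    | nil => simp [pvBT]
    | cons b bs =>
      by_cases h : a = b
      · simp only [pvBT, if_pos h, ih bs (p+1), ih bs 1]
        cases pvBT as bs 0 <;> simp <;> omega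
      · by_cases h2 : b < a <;> simp [pvBT, h, h2] <;> try omega

lemma pvBT_none (inc ms : List Char) (h : pvBT inc ms 0 = none) : ∀ i, inc.take i < ms := by
  induction inc generalizing ms with
  | nil =>
    cases ms with
    | nil => simp [pvBT] at h
    | cons b bs => intro i; simp [List.nil_lt_cons]
  | cons a as ih =>
    cases ms with
    | nil => simp [pvBT] at h
    | cons b bs =>
      by_cases hab : a = b
      · rw [pvBT, if_pos hab, pvBT_shift] at h
        cases hres : pvBT as bs 0 with
        | none =>
          intro i
          cases i with
          | zero => exact List.nil_lt_cons b bs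
          | succ j =>
            simp only [List.take_succ_cons]
            exact (List.cons_lt_cons_iff).2 (Or.inr ⟨hab, ih bs hres j⟩)
        | some t => rw [hres] at h; simp at h
      · by_cases h2 : b < a
        · simp [pvBT, hab, h2] at h
        · have hlt : a < b := lt_of_le_of_ne (not_lt.1 h2) hab
          intro i
          cases i with
          | zero => exact List.nil_lt_cons b bs
          | succ j =>
            simp only [List.take_succ_cons]
            exact (List.cons_lt_cons_iff).2 (Or.inl hlt)

lemma pvBT_some (inc ms : List Char) (t : Nat) (h : pvBT inc ms 0 = some t) :
    ∀ i, inc.take i < ms ↔ i < t := by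
  induction inc generalizing ms t with
  | nil =>
    cases ms with
    | nil =>
      simp [pvBT] at h; subst h
      intro i; simp [List.not_lt_nil]
    | cons b bs => simp [pvBT] at h
  | cons a as ih =>
    cases ms with
    | nil =>
      simp [pvBT] at h; subst h
      intro i; simp [List.not_lt_nil]
    | cons b bs =>
      by_cases hab : a = b
      · rw [pvBT, if_pos hab, pvBT_shift] at h
        cases hres : pvBT as bs 0 with
        | none => rw [hres] at h; simp at h
        | some t' =>
          rw [hres] at h; simp at h
          intro i
          cases i with
          | zero =>
            simp only [List.take_zero]
            constructor
            · intro _; omega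
            · intro _; exact List.nil_lt_cons b bs
          | succ j =>
            simp only [List.take_succ_cons, List.cons_lt_cons_iff]
            rw [ih bs t' hres j]
            constructor
            · rintro (hl | ⟨_, hj⟩)
              · exact absurd hl (by simp [hab])
              · omega
            · intro hi; exact Or.inr ⟨hab, by omega⟩
      · by_cases h2 : b < a
        · simp only [pvBT, if_neg hab, if_pos h2] at h
          simp at h
          intro i
          subst h
          cases i with
          | zero => simpa using List.nil_lt_cons b bs
          | succ j =>
            simp only [List.take_succ_cons, List.cons_lt_cons_iff]
            constructor
            · rintro (hl | ⟨he, _⟩)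
              · exact absurd hl (asymm h2)
              · exact absurd he hab
            · omega
        · simp [pvBT, hab, h2] at h

-- one step of the length check: reaching a length is reaching K
lemma pvK_reach (inc exc : List Char) (hne : inc ≠ [] ∨ exc ≠ []) (i : Nat) (h1 : 1 ≤ i)
    (hK : i ≤ (if inc.length ≠ 0 ∧ exc.length ≠ 0 then min inc.length exc.length else max inc.length exc.length)) :
    ((inc.length = i ∨ exc.length = i) ↔ i = (if inc.length ≠ 0 ∧ exc.length ≠ 0 then min inc.length exc.length else max inc.length exc.length)) := by
  have h0 : inc.length ≠ 0 ∨ exc.length ≠ 0 := by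
    rcases hne with h | h
    · exact Or.inl (by simpa using h)
    · exact Or.inr (by simpa using h)
  by_cases hb : inc.length ≠ 0 ∧ exc.length ≠ 0
  · rw [if_pos hb] at hK ⊢; omega
  · rw [if_neg hb] at hK ⊢; omega

-- with an empty include, A's loop only ever returns []
lemma pvALoop_nil (exc : List Char) (ms? : Option (List Char)) :
    ∀ fuel index, pvALoop [] exc ms? fuel index = [] := by
  intro fuel
  induction fuel with
  | zero => intro _; rfl
  | succ fuel ih =>
    intro index
    rw [pvALoop.eq_def]
    simp only [PySem.List.slice_zero_start, PySem.List.slice_to_natCast, List.take_nil]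
    split_ifs <;> first | rfl | exact ih _

-- the loop, characterised by the threshold thr = first index whose prefix is admissible and differing
lemma pvALoop_eq (inc exc : List Char) (ms? : Option (List Char)) (thr : Nat)
    (hne : inc ≠ [] ∨ exc ≠ [])
    (hthr : ∀ i, 1 ≤ i →
        i < (if inc.length ≠ 0 ∧ exc.length ≠ 0 then min inc.length exc.length else max inc.length exc.length) →
        (((match ms? with | some ms => ¬(inc.take i < ms) | none => True) ∧ inc.take i ≠ exc.take i) ↔ thr ≤ i))
    (hthr0 : 1 ≤ thr) :
    ∀ fuel index,
      index < (if inc.length ≠ 0 ∧ exc.length ≠ 0 then min inc.length exc.length else max inc.length exc.length) →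
      (if inc.length ≠ 0 ∧ exc.length ≠ 0 then min inc.length exc.length else max inc.length exc.length) ≤ fuel + index →
      index < thr →
      pvALoop inc exc ms? fuel index =
        (if thr < (if inc.length ≠ 0 ∧ exc.length ≠ 0 then min inc.length exc.length else max inc.length exc.length)
         then inc.take thr else inc) := by
  set K := (if inc.length ≠ 0 ∧ exc.length ≠ 0 then min inc.length exc.length else max inc.length exc.length) with hKdef
  intro fuel
  induction fuel with
  | zero => intro index h1 h2 _; omega
  | succ fuel ih =>
    intro index hiK hfuel hithr
    rw [pvALoop.eq_def]
    simp only [PySem.List.slice_zero_start, PySem.List.slice_to_natCast]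
    set i := index + 1 with hi
    by_cases hreach : inc.length = i ∨ exc.length = i
    · rw [if_pos hreach]
      have : i = K := (pvK_reach inc exc hne i (by omega) (by omega)).1 hreach
      rw [if_neg (by omega)]
    · rw [if_neg hreach]
      have hiltK : i < K := by
        have := pvK_reach inc exc hne i (by omega) (by omega)
        rcases Nat.lt_or_ge i K with h | h
        · exact h
        · have : i = K := by omega
          exact absurd (this ▸ (pvK_reach inc exc hne i (by omega) (by omega)).2 this) hreach
      have hcond := hthr i (by omega) hiltK
      cases ms? with
      | none =>
        rw [if_neg (by simp)]
        by_cases hdiff : List.take i inc ≠ List.take i exc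
        · rw [if_pos hdiff]
          have hthri : thr ≤ i := hcond.1 ⟨trivial, hdiff⟩
          have hthei : thr = i := by omega
          rw [hthei, if_pos hiltK]
        · rw [if_neg hdiff]
          have hnotthr : i < thr := by
            by_contra hx
            exact (hcond.2 (by omega)).2 (by simpa using hdiff)
          exact ih i hiltK (by omega) hnotthr
      | some ms =>
        dsimp only
        by_cases hmin : PySem.Chars.strLt (List.take i inc) ms = true
        · rw [if_pos hmin]
          have hnotthr : i < thr := by
            by_contra hx
            have hc := hcond.2 (by omega)
            simp only [PySem.Chars.strLt, decide_eq_true_eq] at hmin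
            exact hc.1 hmin
          exact ih i hiltK (by omega) hnotthr
        · rw [if_neg hmin]
          have hok : ¬(List.take i inc < ms) := by simpa [PySem.Chars.strLt] using hmin
          by_cases hdiff : List.take i inc ≠ List.take i exc
          · rw [if_pos hdiff]
            have hthri : thr ≤ i := hcond.1 ⟨hok, hdiff⟩
            have hthei : thr = i := by omega
            rw [hthei, if_pos hiltK]
          · rw [if_neg hdiff]
            have hnotthr : i < thr := by
              by_contra hx
              exact (hcond.2 (by omega)).2 (by simpa using hdiff)
            exact ih i hiltK (by omega) hnotthr

-- ===== VERDICT (by name: the statement is the Claim_ definition above) =====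
theorem get_shortest_unique_string_spec : Claim_equal_get_shortest_unique_string := by
  intro include_ exclude min_str _ hpre
  unfold Spec_get_shortest_unique_string get_shortest_unique_string get_shortest_unique_string_alt
  dsimp only
  set inc := include_.toList with hinc
  set exc := exclude.toList with hexc
  have hne : inc ≠ [] ∨ exc ≠ [] := by
    unfold Pre_get_shortest_unique_string at hpre
    by_contra h
    push_neg at h
    exact hpre ⟨String.toList_eq_nil_iff.1 h.1, String.toList_eq_nil_iff.1 h.2⟩
  set K := if inc.length ≠ 0 ∧ exc.length ≠ 0 then min inc.length exc.length else max inc.length exc.length with hK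
  by_cases hli : inc = []
  · -- empty include: A's loop only returns [], B returns include_ = ""
    have hexcne : exc ≠ [] := by
      rcases hne with h | h
      · exact absurd hli h
      · exact h
    have htl : include_.toList = [] := by rw [← hinc]; exact hli
    have hincstr : include_ = "" := String.toList_eq_nil_iff.1 htl
    rw [hli, pvALoop_nil]
    have hA : String.ofList ([] : List Char) = include_ := by rw [hincstr]
    rw [hA]
    have hj : ∀ l : List Char, pvBScan [] l 0 = 0 := by
      intro l; cases l <;> rfl
    have hle0 : exc.length ≠ 0 := by simpa using hexcne
    rw [if_neg (by rw [hj exc]; simp only [List.length_nil]; rintro ⟨_, h2⟩; exact hle0 h2.symm)]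
    cases min_str with
    | none =>
      dsimp only
      rw [if_neg (by rw [if_pos hexcne]; simp only [List.length_nil]; omega)]
    | some ms =>
      dsimp only
      cases hms : ms.toList with
      | nil =>
        dsimp [pvBT]
        rw [if_neg (by rw [if_pos hexcne]; omega)]
      | cons c cs =>
        dsimp [pvBT]
  · -- include nonempty
    have hli0 : inc.length ≠ 0 := by simpa using hli
    have hstop : (if exc ≠ [] then min inc.length exc.length else inc.length) = K := by
      by_cases hle : exc = []
      · have : exc.length = 0 := by rw [hle]; rfl
        rw [if_neg (by simpa using hle), hK, if_neg (by omega)]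
        omega
      · have : exc.length ≠ 0 := by simpa using hle
        rw [if_pos hle, hK, if_pos ⟨hli0, this⟩]
    have hKb : 1 ≤ K ∧ K ≤ inc.length + exc.length + 1 := by
      by_cases hb : inc.length ≠ 0 ∧ exc.length ≠ 0
      · rw [hK, if_pos hb]; omega
      · rw [hK, if_neg hb]; omega
    cases hm : pvBMismatch inc exc 0 with
    | none =>
      have heq : inc = exc := pvBMismatch_none _ _ hm
      have hj : pvBScan inc exc 0 = inc.length ∧ pvBScan inc exc 0 = exc.length := by
        constructor
        · rw [pvBScan_getD, hm]; rfl
        · rw [pvBScan_getD, hm, heq]; rfl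
      rw [if_pos hj]
      have hloop := pvALoop_eq inc exc (min_str.map String.toList) (K + 1) hne
        (by
          intro i h1 h2
          rw [← hK] at h2
          constructor
          · rintro ⟨_, hd⟩; exact absurd (by rw [heq]) hd
          · intro h; omega)
        (by omega) (inc.length + exc.length + 1) 0 (by rw [← hK]; omega) (by rw [← hK]; omega) (by omega)
      rw [← hK] at hloop
      rw [hloop, if_neg (by omega)]
      exact String.ofList_toList
    | some m =>
      have hj : pvBScan inc exc 0 = m := by rw [pvBScan_getD, hm]; rfl
      rw [if_neg (by rw [hj]; exact pvBMismatch_some_ne inc exc m hm)]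
      rw [hj]
      cases min_str with
      | none =>
        have hms := pvBMismatch_some inc exc m hm
        have hloop := pvALoop_eq inc exc none (max (m + 1) 0) hne
          (by
            intro i h1 h2
            constructor
            · rintro ⟨_, hd⟩
              have h4 : ¬ (i ≤ m) := fun hx => hd ((hms i).2 hx)
              omega
            · intro h
              refine ⟨trivial, ?_⟩
              intro hd
              have := (hms i).1 hd
              omega)
          (by omega) (inc.length + exc.length + 1) 0 (by rw [← hK]; omega) (by rw [← hK]; omega) (by omega)
        rw [← hK] at hloop
        simp only [Option.map_none] at hloop ⊢
        rw [hloop]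
        rw [hstop]
        by_cases hlt : max (m + 1) 0 < K
        · rw [if_pos hlt, if_pos hlt, PySem.List.slice_to_natCast]
        · rw [if_neg hlt, if_neg hlt]
          exact String.ofList_toList
      | some ms =>
        simp only [Option.map_some]
        cases hpt : pvBT inc ms.toList 0 with
        | none =>
          have hlt := pvBT_none inc ms.toList hpt
          have hloop := pvALoop_eq inc exc (some ms.toList) (K + 1) hne
            (by
              intro i h1 h2
              rw [← hK] at h2
              constructor
              · rintro ⟨hok, _⟩; exact absurd (hlt i) hok
              · intro h; omega)
            (by omega) (inc.length + exc.length + 1) 0 (by rw [← hK]; omega) (by rw [← hK]; omega) (by omega)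
          rw [← hK] at hloop
          rw [hloop, if_neg (by omega)]
          dsimp only
          exact String.ofList_toList
        | some t =>
          have hms := pvBMismatch_some inc exc m hm
          have htc := pvBT_some inc ms.toList t hpt
          have hloop := pvALoop_eq inc exc (some ms.toList) (max (m + 1) t) hne
            (by
              intro i h1 h2
              constructor
              · rintro ⟨hok, hd⟩
                have h3 : ¬ (i < t) := fun hx => hok ((htc i).2 hx)
                have h4 : ¬ (i ≤ m) := fun hx => hd ((hms i).2 hx)
                omega
              · intro h
                refine ⟨?_, ?_⟩
                · intro hx
                  have := (htc i).1 hx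
                  omega
                · intro hd
                  have := (hms i).1 hd
                  omega)
            (by omega) (inc.length + exc.length + 1) 0 (by rw [← hK]; omega) (by rw [← hK]; omega) (by omega)
          rw [← hK] at hloop
          rw [hloop]
          dsimp only
          rw [hstop]
          by_cases hlt2 : max (m + 1) t < K
          · rw [if_pos hlt2, if_pos hlt2, PySem.List.slice_to_natCast]
          · rw [if_neg hlt2, if_neg hlt2]
            exact String.ofList_toList
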